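-- pv_equiv track=rewrite | github.com/eliahreeves/spice2sch | src/spice_to_sch/main.py | extract_io_from_spice
-- ===== SOURCE A (Python) =====
-- from typing import List, Tuple
--
-- def extract_io_from_spice(subckt_line: str) -> Tuple[List[str], List[str]]:
--     tokens = subckt_line.split()
--     if len(tokens) < 3:
--         raise ValueError("Invalid format")
--
--     ports = tokens[2:]
--
--     power_ground = {"VDD", "VCC", "VSS", "GND", "VGND", "VPWR", "VNB", "VPB"}
--
--     inputs: List[str] = []
--     outputs: List[str] = []
--     found_inputs = False
--
--     for port in ports:
--         is_port_power_ground = port in power_ground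
--         if is_port_power_ground:
--             found_inputs = True
--
--         if not found_inputs or is_port_power_ground:
--             inputs.append(port)
--         else:
--             outputs.append(port)
--     return (inputs, outputs)
-- ===== SOURCE B (Python) =====
-- from typing import List, Tuple
--
-- def extract_io_from_spice(subckt_line: str) -> Tuple[List[str], List[str]]:
--     tokens = subckt_line.split()
--     if len(tokens) < 3:
--         raise ValueError("Invalid format")
--
--     ports = tokens[2:]
--     power_ground = {"VDD", "VCC", "VSS", "GND", "VGND", "VPWR", "VNB", "VPB"}
--
--     # pivot: index of the first power/ground port (len(ports) if none)
--     idx = next((i for i, p in enumerate(ports) if p in power_ground), len(ports))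
--     tail = ports[idx:]
--     inputs = ports[:idx] + [p for p in tail if p in power_ground]
--     outputs = [p for p in tail if p not in power_ground]
--     return (inputs, outputs)
-- ===== Notes on version B (the rewrite author's own statement) =====
-- stated objective: simpler
-- what changed: Replaces the flag-threaded per-element branch loop with an explicit pivot (first power/ground index) followed by a take/partition of the tail, dropping the found_inputs state entirely.
import Mathlib
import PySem

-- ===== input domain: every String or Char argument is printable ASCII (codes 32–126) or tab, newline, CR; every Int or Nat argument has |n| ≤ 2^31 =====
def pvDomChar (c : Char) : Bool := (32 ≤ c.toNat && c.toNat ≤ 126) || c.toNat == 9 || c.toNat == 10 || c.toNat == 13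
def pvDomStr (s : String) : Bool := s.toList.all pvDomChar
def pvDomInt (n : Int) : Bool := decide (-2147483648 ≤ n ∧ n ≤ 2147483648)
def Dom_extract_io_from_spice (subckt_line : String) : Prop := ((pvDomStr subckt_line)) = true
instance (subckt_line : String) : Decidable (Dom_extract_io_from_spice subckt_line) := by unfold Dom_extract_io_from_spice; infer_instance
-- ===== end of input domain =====

-- B replaces A's flag-threaded loop by a pivot (first power/ground index) plus take/partition; return values agree on all lines with ≥ 3 whitespace tokens.

-- ===== PORT A =====
-- the power_ground set (a set of string literals; membership test only)
def pvPG : List String := ["VDD", "VCC", "VSS", "GND", "VGND", "VPWR", "VNB", "VPB"]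

-- one iteration of A's for-loop over state (inputs, outputs, found_inputs)
def pvStepA (st : List String × List String × Bool) (port : String) : List String × List String × Bool :=
  let isPG := pvPG.contains port
  let found := st.2.2 || isPG
  if !found || isPG then (st.1 ++ [port], st.2.1, found) else (st.1, st.2.1 ++ [port], found)

def extract_io_from_spice (subckt_line : String) : List String × List String :=
  let tokens := PySem.Str.split₀ subckt_line
  if tokens.length < 3 then ([], [])  -- Python raises ValueError here; excluded by Pre_
  else
    let ports := tokens.drop 2
    let st := ports.foldl pvStepA ([], [], false)
    (st.1, st.2.1)

-- ===== PORT B =====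
def extract_io_from_spice_alt (subckt_line : String) : List String × List String :=
  let tokens := PySem.Str.split₀ subckt_line
  if tokens.length < 3 then ([], [])  -- Python raises ValueError here; excluded by Pre_
  else
    let ports := tokens.drop 2
    let idx := ports.findIdx (fun p => pvPG.contains p)
    let tail := ports.drop idx
    (ports.take idx ++ tail.filter (fun p => pvPG.contains p),
     tail.filter (fun p => !pvPG.contains p))

-- ===== PRECONDITION & SPEC =====
-- Pre_ excludes exactly the lines with fewer than 3 whitespace tokens, on which A raises ValueError.
def Pre_extract_io_from_spice (subckt_line : String) : Prop :=
  3 ≤ (PySem.Str.split₀ subckt_line).length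
instance (subckt_line : String) : Decidable (Pre_extract_io_from_spice subckt_line) := by
  unfold Pre_extract_io_from_spice; infer_instance

def pvWitness_extract_io_from_spice : String := "Xinv inv a VDD y"

def Spec_extract_io_from_spice (subckt_line : String) (out : List String × List String) : Prop := out = extract_io_from_spice_alt subckt_line
instance (subckt_line : String) (out : List String × List String) : Decidable (Spec_extract_io_from_spice subckt_line out) := by unfold Spec_extract_io_from_spice; infer_instance

-- ===== CLAIM (what is proved, stated in full; the proofs are below) =====
def Claim_equal_extract_io_from_spice : Prop := ∀ (subckt_line : String), Dom_extract_io_from_spice subckt_line → Pre_extract_io_from_spice subckt_line → Spec_extract_io_from_spice subckt_line (extract_io_from_spice subckt_line)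

-- ===== LEMMAS AND PROOFS =====

-- once found_inputs is true, A's loop just partitions the rest by power/ground membership
lemma foldl_stepA_true (l : List String) (a b : List String) :
    l.foldl pvStepA (a, b, true) =
      (a ++ l.filter (fun p => pvPG.contains p),
       b ++ l.filter (fun p => !pvPG.contains p), true) := by
  induction l generalizing a b with
  | nil => simp
  | cons p l ih =>
    by_cases h : p ∈ pvPG <;>
      simp [pvStepA, h, ih]

-- from a false flag, A's loop realises B's pivot-and-partition decomposition
lemma foldl_stepA_false (l : List String) (a b : List String) :
    l.foldl pvStepA (a, b, false) =
      (a ++ l.take (l.findIdx (fun p => pvPG.contains p))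
         ++ (l.drop (l.findIdx (fun p => pvPG.contains p))).filter (fun p => pvPG.contains p),
       b ++ (l.drop (l.findIdx (fun p => pvPG.contains p))).filter (fun p => !pvPG.contains p),
       l.any (fun p => pvPG.contains p)) := by
  induction l generalizing a b with
  | nil => simp
  | cons p l ih =>
    by_cases h : p ∈ pvPG
    · simp [pvStepA, h, foldl_stepA_true, List.findIdx_cons]
    · simp [pvStepA, h, ih, List.findIdx_cons, List.any_cons]

-- ===== VERDICT (by name: the statement is the Claim_ definition above) =====
theorem extract_io_from_spice_spec : Claim_equal_extract_io_from_spice := by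
  intro s _ hpre
  unfold Spec_extract_io_from_spice extract_io_from_spice extract_io_from_spice_alt
  have hlen : ¬ (PySem.Str.split₀ s).length < 3 := by
    unfold Pre_extract_io_from_spice at hpre; omega
  simp only [hlen, if_false]
  rw [foldl_stepA_false]
  simp
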